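-- pv_equiv track=rewrite | github.com/robstudy/CSCI-154-Simulation | Final Project/main.py | harden_until
-- ===== SOURCE A (Python) =====
-- def check_softness(hand):
--     """
--     Sees if we have any ace in our hand that can be treated as a 1 or 11 without going over.
--     Checks if the given hand is soft (ace is set to 11) or is hard (ace is set to 1).
--     """
--
--     # index flag
--     index = -1
--
--     # for each card in hand, if one has a value of 11, set index to that card
--     for i in range(len(hand) - 1, 0 - 1, -1):
--         if hand[i] == 11:
--             index = i
--
--     # if index changed then it's indeed soft, but if still -1 then it's hard/false
--     is_soft = True if index is not -1 else False
--
--     # return the softness value and the soft card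
--     return is_soft, index
--
-- def harden(hand, index):
--     """
--     Hardens the hand, turning the ace from an 11 to a 1.
--     Uses index to see which card from the hand is the ace.
--     """
--
--     hand[index] = 1
--     return hand
--
-- def harden_until(new_card, hand):
--     """
--     Takes in a value we want to add to the hand, and hardens the hand until the new card can be accepted, or you bust.
--     These functions can be reused for any policy that cares about soft/hard hands.
--     """
--
--     # when adding a new card, if the new hand value is over 21
--     if new_card + sum(hand) > 21:
--
--         # check to see if it's still soft
--         is_soft, index = check_softness(hand)
--
--         # if it is, harden it
--         if is_soft:
--             return harden_until(new_card, harden(hand, index))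
--
--         # if the new card is 11, harden it
--         elif new_card == 11:
--             return harden_until(1, hand)
--
--         # if it isn't soft then it's already hard, we can't do anything, we've lost dude
--         else:
--             hand.clear()
--             return hand, False
--
--     # otherwise, we add a new card and return the (successful) new hand
--     else:
--         hand.append(new_card)
--         return hand, True
-- ===== SOURCE B (Python) =====
-- def harden_until(new_card, hand):
--     """Closed-form re-implementation: compute from the hand's sum and ace count
--     how many aces must harden, then do it in one pass (mutates hand like the original)."""
--     s = sum(hand)
--     a = hand.count(11)
--     need = new_card + s - 21
--     k = 0 if need <= 0 else -(-need // 10)   # ceil(need / 10) aces to harden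
--     if k <= a:
--         pass
--     elif new_card == 11 and 1 + s - 10 * a <= 21:
--         new_card = 1
--         k = a
--     else:
--         hand.clear()
--         return hand, False
--     i = 0
--     while k > 0:
--         if hand[i] == 11:
--             hand[i] = 1
--             k -= 1
--         i += 1
--     hand.append(new_card)
--     return hand, True
-- ===== Notes on version B (the rewrite author's own statement) =====
-- stated objective: alternative
-- what changed: Replaces A's repeated recursion (each round rescanning the hand for sum and leftmost ace) by a closed-form computation: one pass computes sum and ace count, arithmetic (ceiling division) decides how many aces must harden or whether it is a bust, and a single pass hardens exactly that many leftmost aces.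
import Mathlib
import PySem

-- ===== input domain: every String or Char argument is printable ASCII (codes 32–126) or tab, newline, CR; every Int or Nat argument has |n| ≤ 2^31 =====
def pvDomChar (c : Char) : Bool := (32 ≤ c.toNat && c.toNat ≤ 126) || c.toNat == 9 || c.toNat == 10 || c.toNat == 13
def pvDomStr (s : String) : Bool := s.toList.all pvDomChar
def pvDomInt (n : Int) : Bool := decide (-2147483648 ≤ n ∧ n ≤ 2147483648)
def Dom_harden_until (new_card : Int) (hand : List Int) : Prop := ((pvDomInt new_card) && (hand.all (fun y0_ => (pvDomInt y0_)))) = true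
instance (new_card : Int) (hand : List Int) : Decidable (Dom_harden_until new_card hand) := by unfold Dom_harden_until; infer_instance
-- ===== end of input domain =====

-- B replaces A's harden-one-ace-and-recurse scheme by a closed-form count: one pass computes
-- sum and ace count, ceiling division decides how many aces harden (or bust), one pass hardens them.
-- (A mutates the hand list in place; B performs the same mutations; the equivalence proved here is about the return value.)


-- ===== PORT A =====
-- the descending index loop 'for i in range(len(hand)-1, -1, -1)' as structural recursion on the counter
def softLoop (hand : List Int) : Nat → Int → Int
  | 0, idx => idx
  | n + 1, idx => softLoop hand n (if PySem.List.pyGetD hand (n : Int) 0 == 11 then (n : Int) else idx)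

def check_softness (hand : List Int) : Bool × Int :=
  let index := softLoop hand hand.length (-1)
  (decide (index ≠ -1), index)

-- hand[index] = 1; within harden_until the index is always in range, where pySetD is exactly hand[index] = 1
def harden (hand : List Int) (index : Int) : List Int := PySem.List.pySetD hand index 1

-- lemmas the port needs for termination (cited by decreasing_by; the equivalence proofs reuse them)
lemma softLoop_spec (hand : List Int) : ∀ (n : Nat), n ≤ hand.length → ∀ (idx : Int),
    softLoop hand n idx
      = match (hand.take n).findIdx? (fun x => x == 11) with
        | some j => (j : Int)
        | none => idx := by
  intro n
  induction n with
  | zero => intro _ idx; simp [softLoop]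
  | succ m ih =>
    intro hn idx
    have hm : m < hand.length := by omega
    have htake : hand.take (m + 1) = hand.take m ++ [hand[m]] := List.take_succ_eq_append_getElem hm
    have hget : PySem.List.pyGetD hand (m : Int) 0 = hand[m] := by
      simp [PySem.List.pyGetD_natCast, hm]
    rw [softLoop, ih (by omega), htake, List.findIdx?_append]
    cases h : (hand.take m).findIdx? (fun x => x == 11) with
    | some j => simp
    | none =>
      have hlen : (hand.take m).length = m := by simp [List.length_take]; omega
      by_cases h11 : hand[m] = 11 <;>
        simp [hget, h11, hlen, List.findIdx?_cons]

lemma check_softness_none {hand : List Int} (h : hand.count 11 = 0) :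
    check_softness hand = (false, -1) := by
  have h11 : (11 : Int) ∉ hand := by rwa [← List.count_eq_zero]
  have hf : hand.findIdx? (fun x => x == 11) = none := by
    rw [List.findIdx?_eq_none_iff]
    intro x hx; simp; rintro rfl; exact h11 hx
  simp [check_softness, softLoop_spec hand hand.length le_rfl, List.take_length, hf]

lemma check_softness_some {hand : List Int} (h : hand.count 11 ≠ 0) :
    ∃ j : Nat, hand.findIdx? (fun x => x == 11) = some j ∧
      check_softness hand = (true, (j : Int)) := by
  have h11 : (11 : Int) ∈ hand := List.count_pos_iff.mp (Nat.pos_of_ne_zero h)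
  cases hj : hand.findIdx? (fun x => x == 11) with
  | none =>
    have := List.findIdx?_eq_none_iff.mp hj 11 h11
    simp at this
  | some j =>
    refine ⟨j, rfl, ?_⟩
    have hidx : softLoop hand hand.length (-1) = (j : Int) := by
      rw [softLoop_spec hand hand.length le_rfl, List.take_length, hj]
    simp [check_softness, hidx]

lemma count_set_lt {hand : List Int} {j : Nat} (hj : j < hand.length) (h11 : hand[j] = 11) :
    (hand.set j 1).count 11 < hand.count 11 := by
  have hc : 0 < hand.count 11 := List.count_pos_iff.mpr (h11 ▸ hand.getElem_mem hj)
  rw [List.count_set hj, if_pos (show (hand[j] == 11) = true from by simp [h11]),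
    if_neg (show ¬ (((1 : Int) == 11) = true) from by decide)]
  omega

lemma count_harden_lt {hand : List Int} {i : Int} (h : check_softness hand = (true, i)) :
    (harden hand i).count 11 < hand.count 11 := by
  by_cases hc : hand.count 11 = 0
  · rw [check_softness_none hc] at h; simp at h
  · obtain ⟨j, hj, heq⟩ := check_softness_some hc
    rw [heq] at h
    have hij : (j : Int) = i := congrArg Prod.snd h
    subst hij
    obtain ⟨hlt, hg⟩ := List.findIdx?_eq_some_iff_getElem.mp hj
    have hset : harden hand (j : Int) = hand.set j 1 := by
      simp [harden, PySem.List.pySetD_natCast]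
    rw [hset]
    exact count_set_lt hlt (by simpa using hg.1)

def harden_until (new_card : Int) (hand : List Int) : List Int × Bool :=
  if new_card + hand.sum > 21 then
    let p := check_softness hand
    if hs : p.1 = true then
      harden_until new_card (harden hand p.2)
    else if new_card == 11 then
      harden_until 1 hand
    else
      ([], false)
  else
    (hand ++ [new_card], true)
termination_by (hand.count 11, if new_card == 11 then 1 else 0)
decreasing_by
  · apply Prod.Lex.left
    exact count_harden_lt (i := p.2) (by rw [← hs])
  · apply Prod.Lex.right
    simp_all

-- ===== PORT B =====
-- the 'while k > 0' hardening pass of Source B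
def replaceFirstAux : List Int → Int → List Int
  | [], _ => []
  | x :: xs, k =>
    if 0 < k then
      if x == 11 then 1 :: replaceFirstAux xs (k - 1) else x :: replaceFirstAux xs k
    else x :: xs

def harden_until_alt (new_card : Int) (hand : List Int) : List Int × Bool :=
  let s := hand.sum
  let a : Int := (hand.count 11 : Int)
  let need := new_card + s - 21
  let k : Int := if need ≤ 0 then 0 else -(PySem.Int.floordiv (-need) 10)
  if k ≤ a then
    (replaceFirstAux hand k ++ [new_card], true)
  else if new_card == 11 && decide (1 + s - 10 * a ≤ 21) then
    (replaceFirstAux hand a ++ [1], true)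
  else
    ([], false)

-- ===== PRECONDITION & SPEC =====
def Spec_harden_until (new_card : Int) (hand : List Int) (out : List Int × Bool) : Prop := out = harden_until_alt new_card hand
instance (new_card : Int) (hand : List Int) (out : List Int × Bool) : Decidable (Spec_harden_until new_card hand out) := by unfold Spec_harden_until; infer_instance

-- ===== CLAIM (what is proved, stated in full; the proofs are below) =====
def Claim_equal_harden_until : Prop := ∀ (new_card : Int) (hand : List Int), Dom_harden_until new_card hand → Spec_harden_until new_card hand (harden_until new_card hand)

-- ===== LEMMAS AND PROOFS =====

lemma replaceFirstAux_nonpos {hand : List Int} {k : Int} (h : k ≤ 0) :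
    replaceFirstAux hand k = hand := by
  cases hand with
  | nil => rfl
  | cons x xs => simp [replaceFirstAux]; omega

lemma replaceFirst_one_eq_set {hand : List Int} {j : Nat}
    (hj : hand.findIdx? (fun x => x == 11) = some j) :
    replaceFirstAux hand 1 = hand.set j 1 := by
  induction hand generalizing j with
  | nil => simp at hj
  | cons x xs ih =>
    rw [List.findIdx?_cons] at hj
    by_cases hx : x = 11
    · rw [if_pos (by simp [hx])] at hj
      have hj0 : j = 0 := by simpa using hj.symm
      subst hj0; subst hx
      simp [replaceFirstAux, replaceFirstAux_nonpos le_rfl]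
    · rw [if_neg (by simp [hx])] at hj
      cases hfx : xs.findIdx? (fun x => x == 11) with
      | none => rw [hfx] at hj; simp at hj
      | some j' =>
        rw [hfx] at hj
        have hj' : j = j' + 1 := by simpa using hj.symm
        subst hj'
        simp [replaceFirstAux, hx, ih hfx]

lemma sum_replaceFirst_one {hand : List Int} (h : (11 : Int) ∈ hand) :
    (replaceFirstAux hand 1).sum = hand.sum - 10 := by
  induction hand with
  | nil => simp at h
  | cons x xs ih =>
    by_cases hx : x = 11
    · subst hx
      simp [replaceFirstAux, replaceFirstAux_nonpos le_rfl]
      omega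
    · have h' : (11 : Int) ∈ xs := by
        rcases List.mem_cons.mp h with h1 | h2
        · exact absurd h1.symm hx
        · exact h2
      simp [replaceFirstAux, hx, ih h']
      omega

lemma count_replaceFirst_one {hand : List Int} (h : (11 : Int) ∈ hand) :
    ((replaceFirstAux hand 1).count 11 : Int) = (hand.count 11 : Int) - 1 := by
  induction hand with
  | nil => simp at h
  | cons x xs ih =>
    by_cases hx : x = 11
    · subst hx
      simp [replaceFirstAux, replaceFirstAux_nonpos le_rfl]
    · have h' : (11 : Int) ∈ xs := by
        rcases List.mem_cons.mp h with h1 | h2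
        · exact absurd h1.symm hx
        · exact h2
      simp [replaceFirstAux, hx, ih h']

lemma replaceFirstAux_cons_hit {xs : List Int} {k : Int} (hk : 0 < k) :
    replaceFirstAux (11 :: xs) k = 1 :: replaceFirstAux xs (k - 1) := by
  simp [replaceFirstAux, hk]

lemma replaceFirstAux_cons_miss {x : Int} (hx : x ≠ 11) {xs : List Int} {k : Int} (hk : 0 < k) :
    replaceFirstAux (x :: xs) k = x :: replaceFirstAux xs k := by
  simp [replaceFirstAux, hk, hx]

lemma replaceFirst_comp : ∀ (hand : List Int) (k : Int), 1 ≤ k →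
    replaceFirstAux (replaceFirstAux hand 1) (k - 1) = replaceFirstAux hand k := by
  intro hand
  induction hand with
  | nil => intro k hk; simp [replaceFirstAux]
  | cons x xs ih =>
    intro k hk
    by_cases hx : x = 11
    · subst hx
      rw [replaceFirstAux_cons_hit (by norm_num),
        replaceFirstAux_nonpos (show (1 : Int) - 1 ≤ 0 from by norm_num),
        replaceFirstAux_cons_hit (show (0 : Int) < k from by omega)]
      by_cases hk1 : (0 : Int) < k - 1
      · rw [replaceFirstAux_cons_miss (by norm_num) hk1]
      · rw [replaceFirstAux_nonpos (show k - 1 ≤ 0 from by omega),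
          replaceFirstAux_nonpos (show k - 1 ≤ 0 from by omega)]
    · rw [replaceFirstAux_cons_miss hx (by norm_num),
        replaceFirstAux_cons_miss hx (show (0 : Int) < k from by omega)]
      by_cases hk1 : (0 : Int) < k - 1
      · rw [replaceFirstAux_cons_miss hx hk1, ih k hk]
      · rw [replaceFirstAux_nonpos (show k - 1 ≤ 0 from by omega), show k = 1 from by omega]

lemma ceil_bracket {need : Int} (_h : 0 < need) :
    (-(PySem.Int.floordiv (-need) 10) - 1) * 10 < need ∧
      need ≤ -(PySem.Int.floordiv (-need) 10) * 10 :=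
  (PySem.Int.neg_floordiv_neg_eq_iff_of_pos (by norm_num)).mp rfl

lemma alt_easy {nc : Int} {hand : List Int} (h : nc + hand.sum ≤ 21) :
    harden_until_alt nc hand = (hand ++ [nc], true) := by
  simp only [harden_until_alt]
  rw [if_pos (show nc + hand.sum - 21 ≤ 0 from by omega),
    if_pos (show (0 : Int) ≤ (hand.count 11 : Int) from Int.natCast_nonneg _),
    replaceFirstAux_nonpos le_rfl]

lemma alt_bust {nc : Int} {hand : List Int} (hc : hand.count 11 = 0)
    (hnc : (nc == 11) = false) (hgt : 21 < nc + hand.sum) :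
    harden_until_alt nc hand = ([], false) := by
  have hb := ceil_bracket (need := nc + hand.sum - 21) (by omega)
  simp only [harden_until_alt]
  rw [if_neg (show ¬ nc + hand.sum - 21 ≤ 0 from by omega)]
  rw [if_neg (show ¬ -(PySem.Int.floordiv (-(nc + hand.sum - 21)) 10) ≤ (hand.count 11 : Int) from by
    rw [hc]; push_cast; omega)]
  rw [if_neg (by simp [hnc])]

lemma alt_11_shift {hand : List Int} (hc : hand.count 11 = 0)
    (hgt : 21 < 11 + hand.sum) :
    harden_until_alt 1 hand = harden_until_alt 11 hand := by
  have hbR := ceil_bracket (need := 11 + hand.sum - 21) (by omega)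
  simp only [harden_until_alt]
  rw [if_neg (show ¬ (11 : Int) + hand.sum - 21 ≤ 0 from by omega)]
  rw [if_neg (show ¬ -(PySem.Int.floordiv (-(11 + hand.sum - 21)) 10) ≤ (hand.count 11 : Int) from by
    rw [hc]; push_cast; omega)]
  by_cases hs20 : hand.sum ≤ 20
  · rw [if_pos (show (1 : Int) + hand.sum - 21 ≤ 0 from by omega)]
    rw [if_pos (show (0 : Int) ≤ (hand.count 11 : Int) from Int.natCast_nonneg _)]
    rw [if_pos (show ((11 : Int) == 11 && decide (1 + hand.sum - 10 * (hand.count 11 : Int) ≤ 21)) = true from by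
      simp only [beq_self_eq_true, Bool.true_and, decide_eq_true_eq]; omega)]
    rw [replaceFirstAux_nonpos le_rfl, replaceFirstAux_nonpos (show ((hand.count 11 : Nat) : Int) ≤ 0 from by omega)]
  · have hbL := ceil_bracket (need := 1 + hand.sum - 21) (by omega)
    rw [if_neg (show ¬ (1 : Int) + hand.sum - 21 ≤ 0 from by omega)]
    rw [if_neg (show ¬ -(PySem.Int.floordiv (-(1 + hand.sum - 21)) 10) ≤ (hand.count 11 : Int) from by
      rw [hc]; push_cast; omega)]
    rw [if_neg (show ¬ ((1 : Int) == 11 && decide (1 + hand.sum - 10 * (hand.count 11 : Int) ≤ 21)) = true from by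
      simp)]
    rw [if_neg (show ¬ ((11 : Int) == 11 && decide (1 + hand.sum - 10 * (hand.count 11 : Int) ≤ 21)) = true from by
      simp only [beq_self_eq_true, Bool.true_and, decide_eq_true_eq]; omega)]

lemma alt_step {nc : Int} {hand : List Int} (h11 : (11 : Int) ∈ hand)
    (hgt : 21 < nc + hand.sum) :
    harden_until_alt nc (replaceFirstAux hand 1) = harden_until_alt nc hand := by
  have hs' := sum_replaceFirst_one h11
  have ha' := count_replaceFirst_one h11
  have ha1 : 1 ≤ (hand.count 11 : Int) := by
    have := List.count_pos_iff.mpr h11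
    omega
  have hneed : (0 : Int) < nc + hand.sum - 21 := by omega
  have hbr := ceil_bracket hneed
  simp only [harden_until_alt]
  rw [hs', ha']
  by_cases hn' : nc + (hand.sum - 10) - 21 ≤ 0
  · -- one hardened ace already suffices: k = 1 on the right
    have hk1 : -(PySem.Int.floordiv (-(nc + hand.sum - 21)) 10) = 1 := by omega
    rw [if_pos hn', if_neg (show ¬ nc + hand.sum - 21 ≤ 0 from by omega), hk1]
    rw [if_pos (show (0 : Int) ≤ (hand.count 11 : Int) - 1 from by omega),
      if_pos (show (1 : Int) ≤ (hand.count 11 : Int) from ha1)]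
    rw [replaceFirstAux_nonpos le_rfl]
  · have hbr' := ceil_bracket (need := nc + (hand.sum - 10) - 21) (by omega)
    have hkk : -(PySem.Int.floordiv (-(nc + (hand.sum - 10) - 21)) 10)
        = -(PySem.Int.floordiv (-(nc + hand.sum - 21)) 10) - 1 := by omega
    rw [if_neg hn', if_neg (show ¬ nc + hand.sum - 21 ≤ 0 from by omega), hkk]
    have hkge : 1 ≤ -(PySem.Int.floordiv (-(nc + hand.sum - 21)) 10) := by omega
    by_cases hka : -(PySem.Int.floordiv (-(nc + hand.sum - 21)) 10) ≤ (hand.count 11 : Int)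
    · rw [if_pos (by omega), if_pos hka, replaceFirst_comp hand _ hkge]
    · rw [if_neg (by omega), if_neg hka]
      by_cases hb1 : (nc == 11) = true
      · by_cases hb2 : 1 + hand.sum - 10 * (hand.count 11 : Int) ≤ 21
        · rw [if_pos (show (nc == 11 && decide (1 + (hand.sum - 10) - 10 * ((hand.count 11 : Int) - 1) ≤ 21)) = true from by
            simp only [hb1, Bool.true_and, decide_eq_true_eq]; omega)]
          rw [if_pos (show (nc == 11 && decide (1 + hand.sum - 10 * (hand.count 11 : Int) ≤ 21)) = true from by
            simp only [hb1, Bool.true_and, decide_eq_true_eq]; omega)]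
          rw [replaceFirst_comp hand _ ha1]
        · rw [if_neg (show ¬ (nc == 11 && decide (1 + (hand.sum - 10) - 10 * ((hand.count 11 : Int) - 1) ≤ 21)) = true from by
            simp only [hb1, Bool.true_and, decide_eq_true_eq]; omega)]
          rw [if_neg (show ¬ (nc == 11 && decide (1 + hand.sum - 10 * (hand.count 11 : Int) ≤ 21)) = true from by
            simp only [hb1, Bool.true_and, decide_eq_true_eq]; omega)]
      · have hb1' : (nc == 11) = false := by simpa using hb1
        rw [if_neg (by simp [hb1']), if_neg (by simp [hb1'])]

theorem main_equiv : ∀ (N : Nat) (nc : Int) (hand : List Int),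
    hand.count 11 + (if nc == 11 then 1 else 0) ≤ N →
    harden_until nc hand = harden_until_alt nc hand := by
  intro N
  induction N with
  | zero =>
    intro nc hand hN
    have hc : hand.count 11 = 0 := by split at hN <;> omega
    have hnc : (nc == 11) = false := by
      by_cases hb : (nc == 11) = true
      · rw [if_pos hb] at hN; omega
      · simpa using hb
    rw [harden_until]
    by_cases hgt : 21 < nc + hand.sum
    · rw [if_pos hgt]
      simp only [check_softness_none hc]
      rw [dif_neg (by simp), if_neg (by simp [hnc])]
      exact (alt_bust hc hnc hgt).symm
    · rw [if_neg hgt]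
      exact (alt_easy (by omega)).symm
  | succ N ih =>
    intro nc hand hN
    rw [harden_until]
    by_cases hgt : 21 < nc + hand.sum
    · rw [if_pos hgt]
      by_cases hc : hand.count 11 = 0
      · simp only [check_softness_none hc]
        rw [dif_neg (by simp)]
        by_cases hb : (nc == 11) = true
        · rw [if_pos hb]
          have h11 : nc = 11 := by simpa using hb
          rw [ih 1 hand (by rw [show ((1 : Int) == 11) = false from by decide]; simp [hc])]
          subst h11
          exact alt_11_shift hc (by omega)
        · rw [if_neg hb]
          exact (alt_bust hc (by simpa using hb) hgt).symm
      · obtain ⟨j, hj, hcs⟩ := check_softness_some hc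
        simp only [hcs]
        rw [dif_pos trivial]
        have hset : harden hand ((j : Int)) = replaceFirstAux hand 1 := by
          simp only [harden]
          rw [PySem.List.pySetD_natCast]
          exact (replaceFirst_one_eq_set hj).symm
        rw [hset]
        have h11 : (11 : Int) ∈ hand := List.count_pos_iff.mp (Nat.pos_of_ne_zero hc)
        have hcnt : (replaceFirstAux hand 1).count 11 = hand.count 11 - 1 := by
          have := count_replaceFirst_one h11
          have hpos : 0 < hand.count 11 := Nat.pos_of_ne_zero hc
          omega
        rw [ih nc _ (by
          rw [hcnt]
          have hpos : 0 < hand.count 11 := Nat.pos_of_ne_zero hc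
          cases hb2 : nc == 11 <;> simp [hb2] at hN ⊢ <;> omega)]
        exact alt_step h11 hgt
    · rw [if_neg hgt]
      exact (alt_easy (by omega)).symm

-- ===== VERDICT (by name: the statement is the Claim_ definition above) =====
theorem harden_until_spec : Claim_equal_harden_until := by
  intro nc hand _
  unfold Spec_harden_until
  exact main_equiv (hand.count 11 + 1) nc hand (by split <;> omega)
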